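-- pv_equiv track=rewrite | github.com/frescobaldi/frescobaldi | frescobaldi_app/simplemarkdown.py | iter_split
-- ===== SOURCE A (Python) =====
-- def iter_split(text, separator):
--     """Yield pairs of text before and after the separator."""
--     while True:
--         t = text.split(separator, 2)
--         if len(t) < 3:
--             if text:
--                 yield text, ''
--             break
--         yield t[:2]
--         text = t[2]
-- ===== SOURCE B (Python) =====
-- def iter_split(text, separator):
--     """Yield pairs of text before and after the separator."""
--     tokens = text.split(separator)
--     i = 0
--     n = len(tokens)
--     while n - i >= 3:
--         yield tokens[i], tokens[i + 1]
--         i += 2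
--     remainder = separator.join(tokens[i:])
--     if remainder:
--         yield remainder, ''
-- ===== Notes on version B (the rewrite author's own statement) =====
-- stated objective: alternative
-- what changed: A re-splits the shrinking remainder string with maxsplit=2 on every loop iteration; B splits the text once, walks the token list two tokens at a time, and joins only the final remainder tokens for the tail pair.
import Mathlib
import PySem

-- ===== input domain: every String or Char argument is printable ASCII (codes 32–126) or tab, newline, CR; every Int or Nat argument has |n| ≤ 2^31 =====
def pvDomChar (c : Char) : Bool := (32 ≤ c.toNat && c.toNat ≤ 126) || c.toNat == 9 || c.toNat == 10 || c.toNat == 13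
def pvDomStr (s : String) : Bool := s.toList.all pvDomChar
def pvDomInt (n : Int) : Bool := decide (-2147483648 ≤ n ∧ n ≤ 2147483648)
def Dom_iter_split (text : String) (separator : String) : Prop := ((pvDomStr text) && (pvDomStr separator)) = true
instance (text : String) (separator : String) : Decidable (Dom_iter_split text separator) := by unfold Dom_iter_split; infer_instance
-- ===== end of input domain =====

-- B replaces A's re-split of a shrinking string each iteration by one full split and a
-- two-at-a-time walk over the token list, joining the remaining tokens for the tail pair.
-- Both functions are generators in Python; their yielded pairs are collected into a list here.

-- ===== PORT A =====
-- A's while-loop: split with maxsplit 2 each round; fuel = |text| + 1 bounds the loop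
-- (each round strictly shortens text since the separator is non-empty under Pre_).
def iterSplitGoA (sep : List Char) : Nat → List Char → List (List Char × List Char)
  | 0, _ => []
  | fuel + 1, text =>
    let t := PySem.Chars.splitOnMax text sep 2
    if t.length < 3 then
      (if text ≠ [] then [(text, [])] else [])
    else
      (t.getD 0 [], t.getD 1 []) :: iterSplitGoA sep fuel (t.getD 2 [])

def iter_split (text : String) (separator : String) : List (String × String) :=
  if separator.toList = [] then []   -- Python raises ValueError here; excluded by Pre_
  else
    (iterSplitGoA separator.toList (text.toList.length + 1) text.toList).map
      (fun p => (String.ofList p.1, String.ofList p.2))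

-- ===== PORT B =====
-- B's while-loop over the token list (index i advancing by 2 = dropping two tokens),
-- then the joined remainder if non-empty.
def iterSplitGoB (sep : List Char) : List (List Char) → List (List Char × List Char)
  | t0 :: t1 :: t2 :: rest => (t0, t1) :: iterSplitGoB sep (t2 :: rest)
  | ts =>
    let r := PySem.Chars.join sep ts
    if r = [] then [] else [(r, [])]

def iter_split_alt (text : String) (separator : String) : List (String × String) :=
  if separator.toList = [] then []   -- Python raises ValueError here; excluded by Pre_
  else
    (iterSplitGoB separator.toList (PySem.Chars.splitOn text.toList separator.toList)).map
      (fun p => (String.ofList p.1, String.ofList p.2))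

-- ===== PRECONDITION & SPEC =====
-- Pre_ excludes only separator = "", on which Python's str.split raises ValueError (in A and in B alike).
def Pre_iter_split (text : String) (separator : String) : Prop := separator ≠ ""
instance (text : String) (separator : String) : Decidable (Pre_iter_split text separator) := by unfold Pre_iter_split; infer_instance
def pvWitness_iter_split : String × String := ("a-b-c-d", "-")

def Spec_iter_split (text : String) (separator : String) (out : List (String × String)) : Prop := out = iter_split_alt text separator
instance (text : String) (separator : String) (out : List (String × String)) : Decidable (Spec_iter_split text separator out) := by unfold Spec_iter_split; infer_instance

-- ===== CLAIM (what is proved, stated in full; the proofs are below) =====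
def Claim_equal_iter_split : Prop := ∀ (text : String) (separator : String), Dom_iter_split text separator → Pre_iter_split text separator → Spec_iter_split text separator (iter_split text separator)

-- ===== LEMMAS AND PROOFS =====

theorem goOn_acc (sep : List Char) : ∀ (fuel : Nat) (l cur : List Char) (acc : List (List Char)),
    PySem.Chars.splitOn.go sep fuel l cur acc = acc.reverse ++ PySem.Chars.splitOn.go sep fuel l cur [] := by
  intro fuel
  induction fuel with
  | zero => intro l cur acc; simp [PySem.Chars.splitOn.go]
  | succ n ih =>
    intro l cur acc
    cases l with
    | nil => simp [PySem.Chars.splitOn.go]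
    | cons c rest =>
      simp only [PySem.Chars.splitOn.go]
      split
      · rw [ih _ _ (cur.reverse :: acc), ih _ _ [cur.reverse]]; simp
      · rw [ih _ _ acc]

theorem goOn_cur (sep : List Char) : ∀ (fuel : Nat) (l cur : List Char),
    PySem.Chars.splitOn.go sep fuel l cur [] =
      (PySem.Chars.splitOn.go sep fuel l [] []).modifyHead (cur.reverse ++ ·) := by
  intro fuel
  induction fuel with
  | zero => intro l cur; simp [PySem.Chars.splitOn.go]
  | succ n ih =>
    intro l cur
    cases l with
    | nil => simp [PySem.Chars.splitOn.go]
    | cons c rest =>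
      simp only [PySem.Chars.splitOn.go]
      split
      · rw [goOn_acc sep n _ [] [cur.reverse], show ([] : List Char).reverse = [] from rfl,
            goOn_acc sep n _ [] [[]]]
        cases h : PySem.Chars.splitOn.go sep n (List.drop sep.length (c :: rest)) [] [] with
        | nil => simp
        | cons x xs => simp
      · rw [ih rest (c :: cur), ih rest [c]]
        cases h : PySem.Chars.splitOn.go sep n rest [] [] with
        | nil => simp
        | cons x xs => simp

theorem goOn_fuel (sep : List Char) (hsep : sep ≠ []) : ∀ (fuel fuel' : Nat) (l : List Char),
    l.length < fuel → l.length < fuel' →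
    PySem.Chars.splitOn.go sep fuel l [] [] = PySem.Chars.splitOn.go sep fuel' l [] [] := by
  intro fuel
  induction fuel with
  | zero => intro fuel' l h; omega
  | succ n ih =>
    intro fuel' l h h'
    cases l with
    | nil => cases fuel' with
      | zero => omega
      | succ m => simp [PySem.Chars.splitOn.go]
    | cons c rest =>
      cases fuel' with
      | zero => omega
      | succ m =>
        simp only [PySem.Chars.splitOn.go]
        split
        · rename_i hp
          rw [goOn_acc sep n, goOn_acc sep m]
          have hs1 : 1 ≤ sep.length := by
            cases sep with
            | nil => exact absurd rfl hsep
            | cons a t => simp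
          have hd : (List.drop sep.length (c :: rest)).length < n ∧ (List.drop sep.length (c :: rest)).length < m := by
            simp only [List.length_drop, List.length_cons] at *
            omega
          rw [ih m _ hd.1 hd.2]
        · rw [goOn_cur sep n, goOn_cur sep m]
          have : rest.length < n ∧ rest.length < m := by simp at h h'; omega
          rw [ih m _ this.1 this.2]

theorem splitOn_nil (sep : List Char) : PySem.Chars.splitOn [] sep = [[]] := by
  simp [PySem.Chars.splitOn, PySem.Chars.splitOn.go]

theorem splitOn_cons (sep : List Char) (hsep : sep ≠ []) (c : Char) (rest : List Char) :
    PySem.Chars.splitOn (c :: rest) sep =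
      if sep.isPrefixOf (c :: rest) then
        [] :: PySem.Chars.splitOn (List.drop sep.length (c :: rest)) sep
      else (PySem.Chars.splitOn rest sep).modifyHead (c :: ·) := by
  unfold PySem.Chars.splitOn
  rw [show (c :: rest).length + 1 = rest.length + 2 from by simp, PySem.Chars.splitOn.go]
  split
  · rw [goOn_acc, show ([] : List Char).reverse = [] from rfl]
    have hs1 : 1 ≤ sep.length := by
      cases sep with
      | nil => exact absurd rfl hsep
      | cons a t => simp
    have h1 : (List.drop sep.length (c :: rest)).length < rest.length + 1 := by
      simp; omega
    rw [goOn_fuel sep hsep (rest.length + 1) ((List.drop sep.length (c :: rest)).length + 1) _ h1 (by omega)]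
    simp
  · rw [goOn_cur, goOn_fuel sep hsep (rest.length + 1) (rest.length + 1) _ (by simp) (by simp)]
    rfl

theorem goMax_acc (sep : List Char) : ∀ (fuel : Nat) (m : Nat) (l cur : List Char) (acc : List (List Char)),
    PySem.Chars.splitOnMax.go sep fuel m l cur acc = acc.reverse ++ PySem.Chars.splitOnMax.go sep fuel m l cur [] := by
  intro fuel
  induction fuel with
  | zero => intro m l cur acc; simp [PySem.Chars.splitOnMax.go]
  | succ n ih =>
    intro m l cur acc
    cases l with
    | nil => simp [PySem.Chars.splitOnMax.go]
    | cons c rest =>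
      simp only [PySem.Chars.splitOnMax.go]
      split
      · simp
      split
      · rw [ih _ _ _ (cur.reverse :: acc), ih _ _ _ [cur.reverse]]; simp
      · rw [ih _ _ _ acc]

theorem goMax_cur (sep : List Char) : ∀ (fuel : Nat) (m : Nat) (l cur : List Char),
    PySem.Chars.splitOnMax.go sep fuel m l cur [] =
      (PySem.Chars.splitOnMax.go sep fuel m l [] []).modifyHead (cur.reverse ++ ·) := by
  intro fuel
  induction fuel with
  | zero => intro m l cur; simp [PySem.Chars.splitOnMax.go]
  | succ n ih =>
    intro m l cur
    cases l with
    | nil => simp [PySem.Chars.splitOnMax.go]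
    | cons c rest =>
      simp only [PySem.Chars.splitOnMax.go]
      split
      · simp
      split
      · rw [goMax_acc sep n _ _ [] [cur.reverse], show ([] : List Char).reverse = [] from rfl,
            goMax_acc sep n _ _ [] [[]]]
        cases h : PySem.Chars.splitOnMax.go sep n _ (List.drop sep.length (c :: rest)) [] [] with
        | nil => simp
        | cons x xs => simp
      · rw [ih _ rest (c :: cur), ih _ rest [c]]
        cases h : PySem.Chars.splitOnMax.go sep n m rest [] [] with
        | nil => simp
        | cons x xs => simp

theorem goMax_fuel (sep : List Char) (hsep : sep ≠ []) : ∀ (fuel fuel' : Nat) (m : Nat) (l : List Char),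
    l.length < fuel → l.length < fuel' →
    PySem.Chars.splitOnMax.go sep fuel m l [] [] = PySem.Chars.splitOnMax.go sep fuel' m l [] [] := by
  intro fuel
  induction fuel with
  | zero => intro fuel' m l h; omega
  | succ n ih =>
    intro fuel' m l h h'
    cases l with
    | nil => cases fuel' with
      | zero => omega
      | succ k => simp [PySem.Chars.splitOnMax.go]
    | cons c rest =>
      cases fuel' with
      | zero => omega
      | succ k =>
        simp only [PySem.Chars.splitOnMax.go]
        split
        · rfl
        split
        · rename_i hm hp
          rw [goMax_acc sep n, goMax_acc sep k]
          have hs1 : 1 ≤ sep.length := by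
            cases sep with
            | nil => exact absurd rfl hsep
            | cons a t => simp
          have hd : (List.drop sep.length (c :: rest)).length < n ∧ (List.drop sep.length (c :: rest)).length < k := by
            simp only [List.length_drop, List.length_cons] at *
            omega
          rw [ih k _ _ hd.1 hd.2]
        · rw [goMax_cur sep n, goMax_cur sep k]
          have : rest.length < n ∧ rest.length < k := by simp at h h'; omega
          rw [ih k _ _ this.1 this.2]

def SM (sep : List Char) (l : List Char) (m : Nat) : List (List Char) :=
  PySem.Chars.splitOnMax.go sep (l.length + 1) m l [] []

theorem SM_eq_splitOnMax (sep l : List Char) :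
    PySem.Chars.splitOnMax l sep 2 = SM sep l 2 := by
  simp [PySem.Chars.splitOnMax, SM]

theorem SM_zero (sep l : List Char) : SM sep l 0 = [l] := by
  cases l <;> simp [SM, PySem.Chars.splitOnMax.go]

theorem SM_nil (sep : List Char) (m : Nat) : SM sep [] m = [[]] := by
  simp [SM, PySem.Chars.splitOnMax.go]

theorem SM_cons (sep : List Char) (hsep : sep ≠ []) (c : Char) (rest : List Char) (m : Nat) :
    SM sep (c :: rest) (m + 1) =
      if sep.isPrefixOf (c :: rest) then
        [] :: SM sep (List.drop sep.length (c :: rest)) m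
      else (SM sep rest (m + 1)).modifyHead (c :: ·) := by
  unfold SM
  rw [show (c :: rest).length + 1 = rest.length + 2 from by simp, PySem.Chars.splitOnMax.go]
  simp only [Nat.succ_ne_zero, if_false]
  split
  · rw [goMax_acc, show ([] : List Char).reverse = [] from rfl]
    have hs1 : 1 ≤ sep.length := by
      cases sep with
      | nil => exact absurd rfl hsep
      | cons a t => simp
    have h1 : (List.drop sep.length (c :: rest)).length < rest.length + 1 := by
      simp; omega
    rw [goMax_fuel sep hsep (rest.length + 1) ((List.drop sep.length (c :: rest)).length + 1) _ _ h1 (by omega)]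
    simp
  · rw [goMax_cur]
    rfl

theorem splitOn_ne_nil (sep : List Char) (hsep : sep ≠ []) (l : List Char) :
    PySem.Chars.splitOn l sep ≠ [] := by
  induction hn : l.length using Nat.strong_induction_on generalizing l with
  | _ n ih =>
    cases l with
    | nil => rw [splitOn_nil]; simp
    | cons c rest =>
      rw [splitOn_cons sep hsep]
      split
      · simp
      · have := ih rest.length (by simp [← hn]) rest rfl
        cases h : PySem.Chars.splitOn rest sep with
        | nil => exact absurd h this
        | cons x xs => simp

theorem join_modifyHead (sep : List Char) (c : Char) (ts : List (List Char)) (h : ts ≠ []) :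
    PySem.Chars.join sep (ts.modifyHead (c :: ·)) = c :: PySem.Chars.join sep ts := by
  cases ts with
  | nil => exact absurd rfl h
  | cons t rest =>
    cases rest with
    | nil => simp [PySem.Chars.join, List.intercalate]
    | cons y ys =>
      simp only [List.modifyHead]
      rw [PySem.Chars.join_cons_cons, PySem.Chars.join_cons_cons]
      simp

theorem join_splitOn (sep : List Char) (hsep : sep ≠ []) (l : List Char) :
    PySem.Chars.join sep (PySem.Chars.splitOn l sep) = l := by
  induction hn : l.length using Nat.strong_induction_on generalizing l with
  | _ n ih =>
    cases l with
    | nil => rw [splitOn_nil]; simp [PySem.Chars.join, List.intercalate]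
    | cons c rest =>
      have hs1 : 1 ≤ sep.length := by
        cases sep with
        | nil => exact absurd rfl hsep
        | cons a t => simp
      rw [splitOn_cons sep hsep]
      split
      · rename_i hp
        have hd : (List.drop sep.length (c :: rest)).length < n := by
          simp [← hn]; omega
        have ihd := ih _ hd (List.drop sep.length (c :: rest)) rfl
        cases hsp : PySem.Chars.splitOn (List.drop sep.length (c :: rest)) sep with
        | nil => exact absurd hsp (splitOn_ne_nil sep hsep _)
        | cons x xs =>
          rw [PySem.Chars.join_cons_cons]
          rw [hsp] at ihd
          rw [ihd]
          have : sep ++ List.drop sep.length (c :: rest) = c :: rest := by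
            conv_rhs => rw [← List.take_append_drop sep.length (c :: rest)]
            congr 1
            exact List.prefix_iff_eq_take.mp (List.isPrefixOf_iff_prefix.mp hp)
          simpa using this
      · have := ih rest.length (by simp [← hn]) rest rfl
        rw [join_modifyHead sep c _ (splitOn_ne_nil sep hsep rest), this]

theorem SM_spec (sep : List Char) (hsep : sep ≠ []) : ∀ (n : Nat) (l : List Char) (m : Nat), l.length ≤ n →
    ((PySem.Chars.splitOn l sep).length ≤ m + 1 → SM sep l m = PySem.Chars.splitOn l sep) ∧
    (m + 1 ≤ (PySem.Chars.splitOn l sep).length →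
       SM sep l m = (PySem.Chars.splitOn l sep).take m
           ++ [PySem.Chars.join sep ((PySem.Chars.splitOn l sep).drop m)] ∧
       PySem.Chars.splitOn (PySem.Chars.join sep ((PySem.Chars.splitOn l sep).drop m)) sep
         = (PySem.Chars.splitOn l sep).drop m) := by
  intro n
  induction n with
  | zero =>
    intro l m hl
    have hln : l = [] := by
      cases l with
      | nil => rfl
      | cons a t => simp at hl
    subst hln
    rw [splitOn_nil]
    refine ⟨fun _ => ?_, fun h2 => ?_⟩
    · rw [SM_nil]
    · simp only [List.length_cons, List.length_nil] at h2
      have hm : m = 0 := by omega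
      subst hm
      rw [SM_nil]
      constructor
      · simp [PySem.Chars.join, List.intercalate]
      · simp [PySem.Chars.join, List.intercalate, splitOn_nil]
  | succ n ih =>
    intro l m hl
    cases m with
    | zero =>
      refine ⟨fun h1 => ?_, fun h2 => ?_⟩
      · have hne := splitOn_ne_nil sep hsep l
        cases hts : PySem.Chars.splitOn l sep with
        | nil => exact absurd hts hne
        | cons t tr =>
          cases tr with
          | nil =>
            have hj := join_splitOn sep hsep l
            rw [hts] at hj
            simp [PySem.Chars.join, List.intercalate] at hj
            rw [SM_zero, hj]
          | cons y ys => rw [hts] at h1; simp at h1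
      · rw [SM_zero]
        constructor
        · simp [join_splitOn sep hsep l]
        · simp [join_splitOn sep hsep l]
    | succ m' =>
      cases l with
      | nil =>
        rw [splitOn_nil]
        refine ⟨fun _ => by rw [SM_nil], fun h2 => by simp at h2⟩
      | cons c rest =>
        have hs1 : 1 ≤ sep.length := by
          cases sep with
          | nil => exact absurd rfl hsep
          | cons a t => simp
        rw [SM_cons sep hsep, splitOn_cons sep hsep]
        split
        · rename_i hp
          set d := List.drop sep.length (c :: rest) with hd
          have hdn : d.length ≤ n := by
            simp only [hd, List.length_drop, List.length_cons]
            simp only [List.length_cons] at hl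
            omega
          have ihd := ih d m' hdn
          refine ⟨fun h1 => ?_, fun h2 => ?_⟩
          · simp only [List.length_cons] at h1
            rw [ihd.1 (by omega)]
          · simp only [List.length_cons] at h2
            obtain ⟨e1, e2⟩ := ihd.2 (by omega)
            refine ⟨?_, ?_⟩
            · rw [e1]; simp
            · simpa using e2
        · have hrn : rest.length ≤ n := by simp at hl; omega
          have ihr := ih rest (m' + 1) hrn
          have hne := splitOn_ne_nil sep hsep rest
          cases hts : PySem.Chars.splitOn rest sep with
          | nil => exact absurd hts hne
          | cons t tr =>
            rw [hts] at ihr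
            refine ⟨fun h1 => ?_, fun h2 => ?_⟩
            · simp only [List.length_modifyHead, List.length_cons] at h1 ⊢
              rw [ihr.1 (by simpa using h1)]
            · simp only [List.length_modifyHead] at h2
              obtain ⟨e1, e2⟩ := ihr.2 (by simpa using h2)
              refine ⟨?_, ?_⟩
              · rw [e1]; simp
              · simpa using e2


theorem rem_lt (sep : List Char) (hsep : sep ≠ []) (l t0 t1 t2 : List Char) (rest : List (List Char))
    (h : PySem.Chars.splitOn l sep = t0 :: t1 :: t2 :: rest) :
    (PySem.Chars.join sep (t2 :: rest)).length < l.length := by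
  have hj := join_splitOn sep hsep l
  rw [h, PySem.Chars.join_cons_cons, PySem.Chars.join_cons_cons] at hj
  have hs1 : 1 ≤ sep.length := by
    cases sep with
    | nil => exact absurd rfl hsep
    | cons a t => simp
  have := congrArg List.length hj
  simp only [List.length_append] at this
  omega

theorem goA_eq_goB (sep : List Char) (hsep : sep ≠ []) : ∀ (fuel : Nat) (l : List Char),
    l.length < fuel → iterSplitGoA sep fuel l = iterSplitGoB sep (PySem.Chars.splitOn l sep) := by
  intro fuel
  induction fuel with
  | zero => intro l h; omega
  | succ n ih =>
    intro l h
    have hne := splitOn_ne_nil sep hsep l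
    have hspec := SM_spec sep hsep l.length l 2 le_rfl
    have hj := join_splitOn sep hsep l
    rw [iterSplitGoA, SM_eq_splitOnMax]
    cases hts : PySem.Chars.splitOn l sep with
    | nil => exact absurd hts hne
    | cons t0 tr =>
      simp only [hts] at hspec hj
      cases tr with
      | nil =>
        rw [hspec.1 (by simp)]
        simp only [List.length_cons, List.length_nil]
        rw [if_pos (by omega), iterSplitGoB]
        · rw [show PySem.Chars.join sep [t0] = t0 from by simp [PySem.Chars.join, List.intercalate]] at hj ⊢
          subst hj
          by_cases hl : t0 = []
          · subst hl; simp
          · simp [hl]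
        · intro a b c r hx; simp at hx
      | cons t1 tr2 =>
        cases tr2 with
        | nil =>
          rw [hspec.1 (by simp)]
          simp only [List.length_cons, List.length_nil]
          rw [if_pos (by omega), iterSplitGoB]
          · rw [hj]
            by_cases hl : l = []
            · subst hl; simp
            · simp [hl]
          · intro a b c r hx; simp at hx
        | cons t2 rest =>
          obtain ⟨e1, e2⟩ := hspec.2 (by simp)
          have e1' : SM sep l 2 = [t0, t1, PySem.Chars.join sep (t2 :: rest)] := by
            simpa using e1
          have e2' : PySem.Chars.splitOn (PySem.Chars.join sep (t2 :: rest)) sep = t2 :: rest := by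
            simpa using e2
          rw [e1']
          rw [if_neg (by simp)]
          simp only [List.getD_cons_zero, List.getD_cons_succ]
          have hrem : (PySem.Chars.join sep (t2 :: rest)).length < n := by
            have := rem_lt sep hsep l t0 t1 t2 rest hts
            omega
          rw [ih _ hrem, e2', iterSplitGoB]


-- ===== VERDICT (by name: the statement is the Claim_ definition above) =====
theorem iter_split_spec : Claim_equal_iter_split := by
  intro text separator _ hpre
  have hsep : separator.toList ≠ [] := fun hnil => hpre (String.toList_eq_nil_iff.mp hnil)
  unfold Spec_iter_split iter_split iter_split_alt
  rw [if_neg hsep, if_neg hsep, goA_eq_goB separator.toList hsep _ _ (by omega)]
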